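-- pv_equiv track=rewrite | github.com/youngrae-debug/quant | packages/quant-engine/src/quant_engine/factors.py | strong_buy_streak
-- ===== SOURCE A (Python) =====
-- def strong_buy_streak(ratings_chronological: list[str]) -> int:
--     streak = 0
--     for rating in reversed(ratings_chronological):
--         if rating == 'Strong Buy':
--             streak += 1
--         else:
--             break
--     return streak
-- ===== SOURCE B (Python) =====
-- def strong_buy_streak(ratings_chronological: list[str]) -> int:
--     # Forward full scan: reset-on-mismatch counter; final value is the trailing run length.
--     streak = 0
--     for rating in ratings_chronological:
--         streak = streak + 1 if rating == 'Strong Buy' else 0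
--     return streak
-- ===== Notes on version B (the rewrite author's own statement) =====
-- stated objective: alternative
-- what changed: Replaces the reverse scan with early break by a single forward pass that resets a counter on every non-'Strong Buy' rating; the final counter equals the trailing run length.
import Mathlib
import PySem

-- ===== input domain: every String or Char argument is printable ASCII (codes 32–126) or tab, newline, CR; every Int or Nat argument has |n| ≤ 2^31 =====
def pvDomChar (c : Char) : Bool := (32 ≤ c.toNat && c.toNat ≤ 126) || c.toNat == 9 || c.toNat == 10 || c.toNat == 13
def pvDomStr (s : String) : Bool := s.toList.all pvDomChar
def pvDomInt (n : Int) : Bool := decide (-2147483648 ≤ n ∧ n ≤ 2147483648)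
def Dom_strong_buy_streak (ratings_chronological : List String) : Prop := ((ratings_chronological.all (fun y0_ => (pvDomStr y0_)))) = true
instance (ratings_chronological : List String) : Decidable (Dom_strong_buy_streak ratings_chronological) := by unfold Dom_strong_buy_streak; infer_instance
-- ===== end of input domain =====

-- ===== PORT A =====
-- A: walk the reversed list, counting while 'Strong Buy', break at first other rating.
def pvGoA : List String → Int
  | [] => 0
  | r :: rest => if r = "Strong Buy" then pvGoA rest + 1 else 0

def strong_buy_streak (ratings_chronological : List String) : Int :=
  pvGoA ratings_chronological.reverse

-- ===== PORT B =====
-- B: forward fold, streak := streak + 1 on 'Strong Buy', reset to 0 otherwise.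
def strong_buy_streak_alt (ratings_chronological : List String) : Int :=
  ratings_chronological.foldl (fun streak rating => if rating = "Strong Buy" then streak + 1 else 0) 0

-- ===== PRECONDITION & SPEC =====
def Spec_strong_buy_streak (ratings_chronological : List String) (out : Int) : Prop := out = strong_buy_streak_alt ratings_chronological
instance (ratings_chronological : List String) (out : Int) : Decidable (Spec_strong_buy_streak ratings_chronological out) := by unfold Spec_strong_buy_streak; infer_instance

-- ===== CLAIM (what is proved, stated in full; the proofs are below) =====
def Claim_equal_strong_buy_streak : Prop := ∀ (ratings_chronological : List String), Dom_strong_buy_streak ratings_chronological → Spec_strong_buy_streak ratings_chronological (strong_buy_streak ratings_chronological)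

-- ===== LEMMAS AND PROOFS =====

-- ===== VERDICT (by name: the statement is the Claim_ definition above) =====
lemma pvFoldl_char (l : List String) (s : Int) :
    l.foldl (fun streak rating => if rating = "Strong Buy" then streak + 1 else 0) s
      = pvGoA l.reverse + (if l.all (· = "Strong Buy") then s else 0) := by
  induction l using List.reverseRecOn with
  | nil => simp [pvGoA]
  | append_singleton l x ih =>
      rw [List.foldl_append]
      simp only [List.foldl_cons, List.foldl_nil, List.reverse_append, List.reverse_singleton,
        List.singleton_append, List.all_append, List.all_cons, List.all_nil]
      by_cases hx : x = "Strong Buy" <;> simp [hx, pvGoA, ih] <;> split_ifs <;> omega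

-- ===== VERDICT (by name: the statement is the Claim_ definition above) =====
theorem strong_buy_streak_spec : Claim_equal_strong_buy_streak := by
  intro l _
  unfold Spec_strong_buy_streak strong_buy_streak strong_buy_streak_alt
  rw [pvFoldl_char]
  split_ifs <;> omega
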